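-- pv_equiv track=rewrite | github.com/ghanteyyy/nppy | CodeWars/RGB To Hex Conversion.py | into_hex
-- ===== SOURCE A (Python) =====
-- def into_hex(nums):
--     _hex = ''
--     dec_to_hex = {10: 'A', 11: 'B', 12: 'C', 13: 'D', 14: 'E', 15: 'F'}
--
--     while nums != 0:
--         rem = nums % 16
--         nums = nums // 16
--
--         if rem >= 10:
--             rem = dec_to_hex[rem]
--
--         _hex += str(rem)
--
--     if len(_hex) == 1:
--         _hex += '0'
--
--     return _hex[::-1]
-- ===== SOURCE B (Python) =====
-- def into_hex(nums):
--     # recursion over nums // 16: digits are produced most-significant first,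
--     # so no final string reversal is needed
--     def f(n):
--         if n == 0:
--             return ''
--         return f(n // 16) + '0123456789ABCDEF'[n % 16]
--
--     result = f(nums)
--     if len(result) == 1:
--         result = '0' + result
--     return result
-- ===== Notes on version B (the rewrite author's own statement) =====
-- stated objective: simpler
-- what changed: Replaced the while-loop that accumulates least-significant digits into a string followed by a slice reversal with a recursion over nums // 16 that emits digits most-significant first, so no reversal is needed; the 10..15 dict is replaced by indexing '0123456789ABCDEF'.
import Mathlib
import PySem

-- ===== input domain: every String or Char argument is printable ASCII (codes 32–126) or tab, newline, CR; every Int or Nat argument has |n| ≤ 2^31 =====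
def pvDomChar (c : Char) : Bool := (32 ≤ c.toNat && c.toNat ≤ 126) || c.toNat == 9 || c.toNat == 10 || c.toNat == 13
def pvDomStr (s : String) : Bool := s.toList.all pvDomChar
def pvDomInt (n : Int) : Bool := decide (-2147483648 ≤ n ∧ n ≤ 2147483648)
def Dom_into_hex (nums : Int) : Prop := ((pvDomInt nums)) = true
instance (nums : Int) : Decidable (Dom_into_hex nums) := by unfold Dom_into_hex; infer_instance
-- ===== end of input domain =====

-- B builds the hex digits most-significant first by recursion over nums // 16 (simpler: no final reversal).

-- ===== PORT A =====
-- termination helper for the while loop (cited by decreasing_by)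
theorem pvFd16_lt (n : Int) (h : 0 < n) :
    (PySem.Int.floordiv n 16).toNat < n.toNat := by
  rw [PySem.Int.floordiv_eq_ediv_of_pos (by omega : (0:Int) < 16)]
  have h1 : 0 ≤ n / 16 := Int.ediv_nonneg (by omega) (by omega)
  have h2 : n / 16 < n := by
    have hd := Int.mul_ediv_add_emod n 16
    have hr1 : 0 ≤ n % 16 := Int.emod_nonneg n (by omega)
    have hr2 : n % 16 < 16 := Int.emod_lt_of_pos n (by omega)
    omega
  omega

def pvDecToHex : PySem.Dict Int String :=
  PySem.Dict.ofList [((10:Int), "A"), (11, "B"), (12, "C"), (13, "D"), (14, "E"), (15, "F")]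

-- the while loop; the Python loop never returns for nums < 0 (excluded by Pre_), here it stops
def intoHexLoop (nums : Int) (hex : List Char) : List Char :=
  if _h : nums ≤ 0 then hex
  else
    let rem := PySem.Int.mod nums 16
    let d : String := if rem ≥ 10 then (pvDecToHex.get? rem).getD "" else PySem.Int.toStr rem
    intoHexLoop (PySem.Int.floordiv nums 16) (hex ++ d.toList)
termination_by nums.toNat
decreasing_by exact pvFd16_lt nums (by omega)

def into_hex (nums : Int) : String :=
  let hex := intoHexLoop nums []
  let hex := if hex.length = 1 then hex ++ ['0'] else hex
  String.ofList ((PySem.List.slice? hex none none (-1)).getD [])   -- _hex[::-1]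

-- ===== PORT B =====
-- f(n): '' if n == 0 else f(n // 16) + '0123456789ABCDEF'[n % 16]
-- (n % 16 is always in range, so the .getD default character is never used;
--  Python's f recurses forever for n < 0 — excluded by Pre_ — here it stops)
def hexRec (n : Int) : List Char :=
  if _h : n ≤ 0 then []
  else hexRec (PySem.Int.floordiv n 16) ++
    [(PySem.List.pyGet? "0123456789ABCDEF".toList (PySem.Int.mod n 16)).getD 'X']
termination_by n.toNat
decreasing_by exact pvFd16_lt n (by omega)

def into_hex_alt (nums : Int) : String :=
  let result := hexRec nums
  let result := if result.length = 1 then '0' :: result else result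
  String.ofList result

-- ===== PRECONDITION & SPEC =====
-- A's while loop never terminates for nums < 0 (nums // 16 stays -1); Pre_ excludes those inputs.
def Pre_into_hex (nums : Int) : Prop := 0 ≤ nums
instance (nums : Int) : Decidable (Pre_into_hex nums) := by unfold Pre_into_hex; infer_instance
def pvWitness_into_hex : Int := 255

def Spec_into_hex (nums : Int) (out : String) : Prop := out = into_hex_alt nums
instance (nums : Int) (out : String) : Decidable (Spec_into_hex nums out) := by unfold Spec_into_hex; infer_instance

-- ===== CLAIM =====
def Claim_equal_into_hex : Prop := ∀ (nums : Int), Dom_into_hex nums → Pre_into_hex nums → Spec_into_hex nums (into_hex nums)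

-- ===== LEMMAS AND PROOFS =====
-- A's digit string equals B's digit character, for each residue 0..15
theorem pvDigit_eq (r : Int) (h0 : 0 ≤ r) (h1 : r < 16) :
    (if r ≥ 10 then (pvDecToHex.get? r).getD "" else PySem.Int.toStr r).toList
      = [(PySem.List.pyGet? "0123456789ABCDEF".toList r).getD 'X'] := by
  interval_cases r <;> simp [pvDecToHex] <;> decide

theorem pvMod16_bounds (n : Int) : 0 ≤ PySem.Int.mod n 16 ∧ PySem.Int.mod n 16 < 16 := by
  constructor
  · exact PySem.Int.mod_nonneg n (b := 16) (by omega)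
  · exact PySem.Int.mod_lt n (b := 16) (by omega)

theorem pvLoop_eq_rec (k : Nat) : ∀ (n : Int) (hex : List Char), 0 ≤ n → n.toNat ≤ k →
    intoHexLoop n hex = hex ++ (hexRec n).reverse := by
  induction k with
  | zero =>
    intro n hex h0 hk
    have hn : n = 0 := by omega
    subst hn
    rw [intoHexLoop, hexRec]
    simp
  | succ k ih =>
    intro n hex h0 hk
    rw [intoHexLoop, hexRec]
    by_cases h : n ≤ 0
    · simp [h]
    · simp only [dif_neg h]
      have hfd : 0 ≤ PySem.Int.floordiv n 16 ∧ (PySem.Int.floordiv n 16).toNat < n.toNat := by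
        refine ⟨?_, pvFd16_lt n (by omega)⟩
        rw [PySem.Int.floordiv_eq_ediv_of_pos (by omega : (0:Int) < 16)]
        exact Int.ediv_nonneg (by omega) (by omega)
      rw [ih (PySem.Int.floordiv n 16) _ hfd.1 (by omega)]
      obtain ⟨hm0, hm1⟩ := pvMod16_bounds n
      rw [pvDigit_eq (PySem.Int.mod n 16) hm0 hm1]
      simp

-- ===== VERDICT =====
theorem into_hex_spec : Claim_equal_into_hex := by
  intro nums _ hpre
  unfold Spec_into_hex into_hex into_hex_alt
  rw [pvLoop_eq_rec nums.toNat nums [] hpre (le_refl _)]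
  simp only [PySem.List.slice?_none_none_neg_one, List.nil_append, Option.getD_some,
    List.length_reverse]
  by_cases h : (hexRec nums).length = 1
  · simp [h]
  · simp [h]
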